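-- pv_equiv track=rewrite | github.com/kingofall410/card_seller | services/text.py | find_brand_phrases
-- ===== SOURCE A (Python) =====
-- def find_brand_phrases(words, brand_set, max_len=4):
--     found = []
--     for n in range(max_len, 0, -1):  # Try longer phrases first
--         for i in range(len(words) - n + 1):
--             phrase = " ".join(words[i:i+n])
--             if phrase in brand_set:
--                 found.append((i, n, phrase))
--     return found
-- ===== SOURCE B (Python) =====
-- def find_brand_phrases(words, brand_set, max_len=4):
--     # Position-major single pass: grow each phrase incrementally, bucket hits by length,
--     # then emit buckets from longest to shortest.
--     buckets = {}
--     L = len(words)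
--     for i in range(L):
--         phrase = ""
--         for k in range(i, min(i + max_len, L)):
--             phrase = words[k] if k == i else phrase + " " + words[k]
--             if phrase in brand_set:
--                 buckets.setdefault(k - i + 1, []).append((i, k - i + 1, phrase))
--     out = []
--     for n in sorted(buckets, reverse=True):
--         out.extend(buckets[n])
--     return out
-- ===== Notes on version B (the rewrite author's own statement) =====
-- stated objective: alternative
-- what changed: Replaces A's length-major nested scan that re-slices and re-joins every window with a single position-major pass that grows each phrase incrementally word by word and buckets hits by phrase length in a dict, then emits the buckets in descending length order.
import Mathlib
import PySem

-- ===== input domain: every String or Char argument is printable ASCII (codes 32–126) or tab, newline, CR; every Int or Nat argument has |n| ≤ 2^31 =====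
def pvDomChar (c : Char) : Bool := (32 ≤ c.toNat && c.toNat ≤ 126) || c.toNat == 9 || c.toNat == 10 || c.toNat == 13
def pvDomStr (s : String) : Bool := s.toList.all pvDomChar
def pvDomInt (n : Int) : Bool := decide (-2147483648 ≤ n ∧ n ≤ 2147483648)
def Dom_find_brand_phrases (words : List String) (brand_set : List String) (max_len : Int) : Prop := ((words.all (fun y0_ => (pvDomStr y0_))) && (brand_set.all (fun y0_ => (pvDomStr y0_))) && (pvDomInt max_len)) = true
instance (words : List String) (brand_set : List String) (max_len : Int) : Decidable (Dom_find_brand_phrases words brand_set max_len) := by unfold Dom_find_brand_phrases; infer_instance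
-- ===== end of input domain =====

-- B replaces A's length-major re-slice-and-join scan by a single position-major pass with
-- incremental phrase growth and length-keyed buckets (objective: alternative, same cost).

-- ===== PORT A =====
def find_brand_phrases (words : List String) (brand_set : List String) (max_len : Int) : List (Int × Int × String) :=
  (PySem.List.pyRange max_len 0 (-1)).foldl (fun found n =>
    (PySem.List.pyRange 0 (PySem.List.len words - n + 1) 1).foldl (fun found i =>
      let phrase := PySem.Str.join " " (PySem.List.slice words (some i) (some (i + n)))
      if phrase ∈ brand_set then found ++ [(i, n, phrase)] else found) found) []

-- ===== PORT B =====
-- one step of Source B's inner loop: extend the phrase by words[k] and record a hit;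
-- words[k] is read with pyGetD "" — exact here since the loop keeps 0 ≤ i ≤ k < len(words)
def altStep (words : List String) (brand_set : List String) (i : Int)
    (st : PySem.Dict Int (List (Int × Int × String)) × String) (k : Int) :
    PySem.Dict Int (List (Int × Int × String)) × String :=
  let phrase := if k = i then PySem.List.pyGetD words k ""
                else st.2 ++ " " ++ PySem.List.pyGetD words k ""
  if phrase ∈ brand_set then
    (st.1.modify (k - i + 1) [] (· ++ [(i, k - i + 1, phrase)]), phrase)
  else (st.1, phrase)

-- Source B's inner loop for one start position i (buckets.setdefault(n, []).append(t) is Dict.modify n [] (· ++ [t]))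
def altRow (words : List String) (brand_set : List String) (max_len : Int)
    (buckets : PySem.Dict Int (List (Int × Int × String))) (i : Int) :
    PySem.Dict Int (List (Int × Int × String)) :=
  ((PySem.List.pyRange i (min (i + max_len) (PySem.List.len words)) 1).foldl
    (altStep words brand_set i) (buckets, "")).1

def find_brand_phrases_alt (words : List String) (brand_set : List String) (max_len : Int) : List (Int × Int × String) :=
  let buckets := (PySem.List.pyRange 0 (PySem.List.len words) 1).foldl
    (altRow words brand_set max_len) PySem.Dict.empty
  (PySem.List.sorted buckets.keys id true).foldl (fun out n => out ++ buckets.getD n []) []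

-- ===== PRECONDITION & SPEC =====
def Spec_find_brand_phrases (words : List String) (brand_set : List String) (max_len : Int) (out : List (Int × Int × String)) : Prop := out = find_brand_phrases_alt words brand_set max_len
instance (words : List String) (brand_set : List String) (max_len : Int) (out : List (Int × Int × String)) : Decidable (Spec_find_brand_phrases words brand_set max_len out) := by unfold Spec_find_brand_phrases; infer_instance

-- ===== CLAIM (what is proved, stated in full; the proofs are below) =====
def Claim_equal_find_brand_phrases : Prop := ∀ (words : List String) (brand_set : List String) (max_len : Int), Dom_find_brand_phrases words brand_set max_len → Spec_find_brand_phrases words brand_set max_len (find_brand_phrases words brand_set max_len)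

-- ===== LEMMAS AND PROOFS =====
def phr (w : List String) (i n : Nat) : String := PySem.Str.join " " ((w.drop i).take n)

theorem join_snoc (sep q : List Char) (ps : List (List Char)) (h : ps ≠ []) :
    PySem.Chars.join sep (ps ++ [q]) = PySem.Chars.join sep ps ++ sep ++ q := by
  induction ps with
  | nil => simp at h
  | cons p rest ih =>
    cases rest with
    | nil => simp [PySem.Chars.join_cons_cons, PySem.Chars.join_singleton]
    | cons r rs =>
      have ih' := ih (by simp)
      simp only [List.cons_append] at ih' ⊢
      rw [PySem.Chars.join_cons_cons, ih', PySem.Chars.join_cons_cons]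
      simp

theorem phr_one (w : List String) (i : Nat) (h : i < w.length) : phr w i 1 = w[i] := by
  apply String.toList_inj.mp
  have : (w.drop i).take 1 = [w[i]] := by
    rw [List.drop_eq_getElem_cons h]
    rfl
  simp [phr, this, PySem.Str.toList_join, PySem.Chars.join_singleton]

theorem phr_succ (w : List String) (i c : Nat) (hc : 1 ≤ c) (h : i + c < w.length) :
    phr w i (c + 1) = phr w i c ++ " " ++ w[i + c] := by
  apply String.toList_inj.mp
  have hseg : (w.drop i).take (c + 1) = (w.drop i).take c ++ [w[i + c]] := by
    have hcl : c < (w.drop i).length := by simp; omega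
    rw [List.take_succ_eq_append_getElem hcl]
    congr 1
    simp
  have hne : ((w.drop i).take c).map String.toList ≠ [] := by
    simp
    omega
  simp only [phr, hseg, PySem.Str.toList_join, String.toList_append, List.map_append, List.map_cons, List.map_nil]
  rw [join_snoc _ _ _ hne]

def pcC (w bs : List String) (i c : Nat) (q : Int) : List (Int × Int × String) :=
  if 1 ≤ q ∧ q ≤ (c : Int) ∧ phr w i q.toNat ∈ bs then [((i : Int), q, phr w i q.toNat)] else []

theorem pcC_zero (w bs : List String) (i : Nat) (q : Int) : pcC w bs i 0 q = [] := by
  unfold pcC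
  rw [if_neg]
  rintro ⟨h1, h2, _⟩
  simp at h2
  omega

theorem pcC_succ_self (w bs : List String) (i c : Nat) :
    pcC w bs i (c + 1) ((c : Int) + 1)
      = if phr w i (c + 1) ∈ bs then [((i : Int), (c : Int) + 1, phr w i (c + 1))] else [] := by
  unfold pcC
  have ht : ((c : Int) + 1).toNat = c + 1 := by omega
  rw [ht]
  split_ifs with h1 h2 h2
  · rfl
  · exact absurd h1.2.2 h2
  · exact absurd ⟨by omega, by push_cast; omega, h2⟩ h1
  · rfl

theorem pcC_succ_ne (w bs : List String) (i c : Nat) (q : Int) (hq : q ≠ (c : Int) + 1) :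
    pcC w bs i (c + 1) q = pcC w bs i c q := by
  unfold pcC
  have : (1 ≤ q ∧ q ≤ ((c + 1 : Nat) : Int) ∧ phr w i q.toNat ∈ bs)
       ↔ (1 ≤ q ∧ q ≤ (c : Int) ∧ phr w i q.toNat ∈ bs) := by
    constructor <;> rintro ⟨a, b, c'⟩ <;> exact ⟨a, by push_cast at b ⊢; omega, c'⟩
  simp only [this]

theorem pcC_self_next (w bs : List String) (i c : Nat) : pcC w bs i c ((c : Int) + 1) = [] := by
  unfold pcC
  rw [if_neg]
  rintro ⟨h1, h2, _⟩
  omega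

theorem inner_fold (w bs : List String) (i c : Nat) (hic : i + c ≤ w.length)
    (d : PySem.Dict Int (List (Int × Int × String))) :
    ((PySem.List.pyRange (i : Int) ((i : Int) + (c : Int)) 1).foldl (altStep w bs (i : Int)) (d, "")).2
      = (if c = 0 then "" else phr w i c)
    ∧ (∀ q, ((PySem.List.pyRange (i : Int) ((i : Int) + (c : Int)) 1).foldl (altStep w bs (i : Int)) (d, "")).1.getD q []
        = d.getD q [] ++ pcC w bs i c q)
    ∧ (∀ q, ((PySem.List.pyRange (i : Int) ((i : Int) + (c : Int)) 1).foldl (altStep w bs (i : Int)) (d, "")).1.contains q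
        = (d.contains q || decide (pcC w bs i c q ≠ [])))
    ∧ (d.keys.Nodup → ((PySem.List.pyRange (i : Int) ((i : Int) + (c : Int)) 1).foldl (altStep w bs (i : Int)) (d, "")).1.keys.Nodup) := by
  induction c with
  | zero =>
    rw [show (i : Int) + ((0 : Nat) : Int) = (i : Int) by omega, PySem.List.pyRange_one_eq_nil (le_refl _)]
    refine ⟨rfl, fun q => ?_, fun q => ?_, fun h => h⟩ <;> simp [pcC_zero]
  | succ c ih =>
    have hic' : i + c ≤ w.length := by omega
    obtain ⟨ih2, ihg, ihc, ihn⟩ := ih hic'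
    have hsplit : PySem.List.pyRange (i : Int) ((i : Int) + ((c + 1 : Nat) : Int)) 1
        = PySem.List.pyRange (i : Int) ((i : Int) + (c : Int)) 1 ++ [(i : Int) + (c : Int)] := by
      push_cast
      rw [show (i : Int) + ((c : Int) + 1) = ((i : Int) + (c : Int)) + 1 by ring]
      exact PySem.List.pyRange_one_succ_right (by omega)
    rw [hsplit, List.foldl_append, List.foldl_cons, List.foldl_nil]
    set r := (PySem.List.pyRange (i : Int) ((i : Int) + (c : Int)) 1).foldl (altStep w bs (i : Int)) (d, "") with hr
    have hw : PySem.List.pyGetD w ((i : Int) + (c : Int)) "" = w[i + c]'(by omega) := by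
      rw [show (i : Int) + (c : Int) = ((i + c : Nat) : Int) by push_cast; ring]
      rw [PySem.List.pyGetD_natCast]
      exact List.getD_eq_getElem w "" (by omega)
    have hphrase : (if (i : Int) + (c : Int) = (i : Int) then PySem.List.pyGetD w ((i : Int) + (c : Int)) ""
        else r.2 ++ " " ++ PySem.List.pyGetD w ((i : Int) + (c : Int)) "") = phr w i (c + 1) := by
      rcases Nat.eq_zero_or_pos c with hc0 | hc0
      · subst hc0
        rw [if_pos (by omega), hw]
        exact (phr_one w i (by omega)).symm
      · rw [if_neg (by omega), hw, ih2, if_neg (by omega)]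
        exact (phr_succ w i c hc0 (by omega)).symm
    unfold altStep
    simp only [hphrase]
    have hkey : (i : Int) + (c : Int) - (i : Int) + 1 = (c : Int) + 1 := by ring
    rw [hkey]
    by_cases hmem : phr w i (c + 1) ∈ bs
    · rw [if_pos hmem]
      refine ⟨rfl, fun q => ?_, fun q => ?_, fun h => ?_⟩
      · by_cases hq : q = (c : Int) + 1
        · subst hq
          rw [PySem.Dict.getD_modify_self, ihg, pcC_succ_self, if_pos hmem,
            pcC_self_next, List.append_nil]
        · rw [PySem.Dict.getD_modify, if_neg hq, ihg, pcC_succ_ne w bs i c q hq]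
      · rw [PySem.Dict.contains_modify, ihc]
        by_cases hq : q = (c : Int) + 1
        · subst hq
          simp [pcC_succ_self, hmem]
        · simp [hq, pcC_succ_ne w bs i c q hq]
      · rw [PySem.Dict.keys_modify]
        exact PySem.Dict.nodup_keys_insert _ _ _ (ihn h)
    · rw [if_neg hmem]
      refine ⟨rfl, fun q => ?_, fun q => ?_, ihn⟩
      · by_cases hq : q = (c : Int) + 1
        · subst hq
          rw [ihg, pcC_succ_self, if_neg hmem, pcC_self_next]
        · rw [ihg, pcC_succ_ne w bs i c q hq]
      · rw [ihc]
        by_cases hq : q = (c : Int) + 1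
        · subst hq
          simp [pcC_succ_self, hmem, pcC_self_next]
        · simp [pcC_succ_ne w bs i c q hq]

def pc (w bs : List String) (m : Int) (i : Nat) (q : Int) : List (Int × Int × String) :=
  if 1 ≤ q ∧ q ≤ m ∧ (i : Int) + q ≤ (w.length : Int) ∧ phr w i q.toNat ∈ bs
  then [((i : Int), q, phr w i q.toNat)] else []

def tc (w bs : List String) (m : Int) (J : Nat) (q : Int) : List (Int × Int × String) :=
  (List.range J).flatMap (fun i => pc w bs m i q)

theorem append_ne_nil_decide {α : Type} [DecidableEq α] (x y : List α) :
    decide (x ++ y ≠ []) = (decide (x ≠ []) || decide (y ≠ [])) := by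
  by_cases hx : x = [] <;> by_cases hy : y = [] <;> simp [hx, hy]

theorem outer_fold (w bs : List String) (m : Int) (J : Nat) (hJ : J ≤ w.length) :
    (∀ q, (((List.range J).map (Nat.cast : Nat → Int)).foldl (altRow w bs m) PySem.Dict.empty).getD q []
        = tc w bs m J q)
    ∧ (∀ q, (((List.range J).map (Nat.cast : Nat → Int)).foldl (altRow w bs m) PySem.Dict.empty).contains q
        = decide (tc w bs m J q ≠ []))
    ∧ (((List.range J).map (Nat.cast : Nat → Int)).foldl (altRow w bs m) PySem.Dict.empty).keys.Nodup := by
  induction J with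
  | zero =>
    refine ⟨fun q => ?_, fun q => ?_, ?_⟩ <;> simp [tc]
  | succ J ih =>
    obtain ⟨ihg, ihc, ihn⟩ := ih (by omega)
    rw [List.range_succ, List.map_append, List.foldl_append]
    simp only [List.map_cons, List.map_nil, List.foldl_cons, List.foldl_nil]
    set D := ((List.range J).map (Nat.cast : Nat → Int)).foldl (altRow w bs m) PySem.Dict.empty with hD
    have htc : ∀ q, tc w bs m (J + 1) q = tc w bs m J q ++ pc w bs m J q := by
      intro q
      simp [tc, List.range_succ]
    unfold altRow
    simp only [PySem.List.len_eq]
    by_cases hempty : min ((J : Int) + m) ((w.length : Int)) ≤ (J : Int)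
    · rw [PySem.List.pyRange_one_eq_nil hempty]
      simp only [List.foldl_nil]
      have hpc : ∀ q, pc w bs m J q = [] := by
        intro q
        unfold pc
        rw [if_neg]
        rintro ⟨h1, h2, h3, _⟩
        omega
      refine ⟨fun q => ?_, fun q => ?_, ihn⟩
      · rw [htc, hpc, List.append_nil, ihg]
      · rw [htc, hpc, List.append_nil, ihc]
    · set c := ((min ((J : Int) + m) ((w.length : Int))) - (J : Int)).toNat with hc
      have hcc : (c : Int) = min ((J : Int) + m) ((w.length : Int)) - (J : Int) := by omega
      have hmin : min ((J : Int) + m) ((w.length : Int)) = (J : Int) + (c : Int) := by omega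
      rw [hmin]
      obtain ⟨_, hg, hcon, hnod⟩ := inner_fold w bs J c (by omega) D
      have hpc : ∀ q, pcC w bs J c q = pc w bs m J q := by
        intro q
        unfold pcC pc
        apply if_congr _ rfl rfl
        constructor
        · rintro ⟨h1, h2, h3⟩
          exact ⟨h1, by omega, by omega, h3⟩
        · rintro ⟨h1, h2, h3, h4⟩
          exact ⟨h1, by omega, h4⟩
      refine ⟨fun q => ?_, fun q => ?_, hnod ihn⟩
      · rw [hg, htc, ihg, hpc]
      · rw [hcon, htc, ihc, hpc, append_ne_nil_decide]

theorem filter_range_lt (K L : Nat) (h : K ≤ L) :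
    (List.range L).filter (fun i => decide (i < K)) = List.range K := by
  induction L with
  | zero => simp_all
  | succ L ih =>
    rcases Nat.lt_or_ge K (L + 1) with hK | hK
    · rw [List.range_succ, List.filter_append, ih (by omega)]
      simp [show ¬(L < K) by omega]
    · have : K = L + 1 := by omega
      subst this
      rw [List.filter_eq_self.mpr]
      intro a ha
      simp only [List.mem_range] at ha
      simpa using ha

theorem flatMap_if_singleton {α β : Type} (p : α → Prop) [DecidablePred p] (f : α → β) (l : List α) :
    l.flatMap (fun x => if p x then [f x] else []) = (l.filter (fun x => decide (p x))).map f := by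
  induction l with
  | nil => rfl
  | cons x xs ih =>
    by_cases h : p x <;> simp [List.flatMap_cons, h, ih]

theorem flatMap_filter_ne_nil {α β : Type} (g : α → List β) (l : List α) :
    l.flatMap g = (l.filter (fun x => decide (g x ≠ []))).flatMap g := by
  induction l with
  | nil => rfl
  | cons x xs ih =>
    by_cases h : g x = [] <;> simp [h, ih]

theorem tc_ne_nil_bounds (w bs : List String) (m : Int) (J : Nat) (q : Int)
    (h : tc w bs m J q ≠ []) : 0 < q ∧ q ≤ m := by
  unfold tc at h
  obtain ⟨x, hx⟩ := List.exists_mem_of_ne_nil _ h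
  rw [List.mem_flatMap] at hx
  obtain ⟨i, _, hxi⟩ := hx
  unfold pc at hxi
  split at hxi
  · rename_i hcond
    exact ⟨by omega, hcond.2.1⟩
  · simp at hxi

theorem row_eq_tc (w bs : List String) (m : Int) (n : Int) (h1 : 0 < n) (h2 : n ≤ m) :
    ((PySem.List.pyRange 0 ((w.length : Int) - n + 1) 1).filter
        (fun i => decide (PySem.Str.join " " (PySem.List.slice w (some i) (some (i + n))) ∈ bs))).map
      (fun i => (i, n, PySem.Str.join " " (PySem.List.slice w (some i) (some (i + n)))))
      = tc w bs m w.length n := by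
  set t := n.toNat with ht
  have hnt : n = (t : Int) := by omega
  have hX : ((w.length : Int) - n + 1).toNat = w.length + 1 - t := by omega
  -- LHS to Nat range
  rw [PySem.List.pyRange_zero, hX, List.filter_map, List.map_map]
  have hsl : ∀ i : Nat, PySem.List.slice w (some (i : Int)) (some ((i : Int) + n)) = (w.drop i).take t := by
    intro i
    rw [hnt, PySem.List.slice_natCast_add]
  -- RHS
  unfold tc
  have hpc : ∀ i : Nat, pc w bs m i n
      = if ((i : Int) + n ≤ (w.length : Int) ∧ phr w i t ∈ bs) then [((i : Int), n, phr w i t)] else [] := by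
    intro i
    unfold pc
    rw [← ht]
    apply if_congr _ rfl rfl
    constructor
    · rintro ⟨_, _, h3, h4⟩; exact ⟨h3, h4⟩
    · rintro ⟨h3, h4⟩; exact ⟨h1, h2, h3, h4⟩
  simp only [hpc]
  rw [flatMap_if_singleton]
  have hfil : (List.range w.length).filter
      (fun (i : Nat) => decide (((i : Int) + n ≤ (w.length : Int)) ∧ phr w i t ∈ bs))
      = (List.range (w.length + 1 - t)).filter (fun i => decide (phr w i t ∈ bs)) := by
    have e1 : (List.range w.length).filter
        (fun (i : Nat) => decide (((i : Int) + n ≤ (w.length : Int)) ∧ phr w i t ∈ bs))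
        = ((List.range w.length).filter (fun i => decide (i < w.length + 1 - t))).filter
            (fun i => decide (phr w i t ∈ bs)) := by
      rw [List.filter_filter]
      apply List.filter_congr
      intro i hi
      simp only [List.mem_range] at hi
      by_cases hc : (i : Int) + n ≤ (w.length : Int)
      · simp [hc, show i < w.length + 1 - t by omega]
      · simp [hc, show ¬(i < w.length + 1 - t) by omega]
    rw [e1, filter_range_lt _ _ (by omega)]
  rw [hfil]
  congr 1
  · funext i
    simp only [Function.comp_apply, hsl]
    rfl
  · apply List.filter_congr
    intro i _
    simp only [Function.comp_apply, hsl]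
    rfl

theorem A_char (w bs : List String) (m : Int) :
    find_brand_phrases w bs m = (PySem.List.pyRange m 0 (-1)).flatMap (tc w bs m w.length) := by
  simp only [find_brand_phrases]
  have hstep : ∀ (found : List (Int × Int × String)) (n : Int), n ∈ PySem.List.pyRange m 0 (-1) →
      (PySem.List.pyRange 0 (PySem.List.len w - n + 1) 1).foldl (fun found i =>
        if PySem.Str.join " " (PySem.List.slice w (some i) (some (i + n))) ∈ bs
        then found ++ [(i, n, PySem.Str.join " " (PySem.List.slice w (some i) (some (i + n))))]
        else found) found
      = found ++ tc w bs m w.length n := by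
    intro found n hn
    rw [PySem.List.mem_pyRange_neg_one] at hn
    simp only [PySem.List.len_eq]
    rw [PySem.List.foldl_append_ite
      (p := fun i => PySem.Str.join " " (PySem.List.slice w (some i) (some (i + n))) ∈ bs)
      (f := fun i => (i, n, PySem.Str.join " " (PySem.List.slice w (some i) (some (i + n)))))]
    rw [row_eq_tc w bs m n hn.1 hn.2]
  refine Eq.trans (PySem.List.foldl_congr_mem _ _
      (fun found n => found ++ tc w bs m w.length n) _ hstep) ?_
  rw [PySem.List.foldl_append_eq_flatMap, List.nil_append]

theorem B_char (w bs : List String) (m : Int) :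
    find_brand_phrases_alt w bs m = (PySem.List.pyRange m 0 (-1)).flatMap (tc w bs m w.length) := by
  unfold find_brand_phrases_alt
  simp only [PySem.List.len_eq, PySem.List.pyRange_zero, Int.toNat_natCast]
  obtain ⟨hg, hcon, hnod⟩ := outer_fold w bs m w.length (le_refl _)
  set D := ((List.range w.length).map (Nat.cast : Nat → Int)).foldl (altRow w bs m) PySem.Dict.empty with hD
  have hkeys : ∀ q, q ∈ D.keys ↔ tc w bs m w.length q ≠ [] := by
    intro q
    rw [← PySem.Dict.contains_iff_mem_keys, hcon q, decide_eq_true_iff]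
  set ys := (PySem.List.pyRange m 0 (-1)).filter (fun n => decide (tc w bs m w.length n ≠ [])) with hys
  have hysnodup : ys.Nodup := by
    apply List.Nodup.filter
    rw [PySem.List.pyRange_neg_one_eq_reverse]
    exact List.nodup_reverse.mpr (PySem.List.nodup_pyRange_one _ _)
  have hperm : ys.Perm D.keys := by
    rw [List.perm_ext_iff_of_nodup hysnodup hnod]
    intro a
    rw [hys]
    simp only [List.mem_filter, PySem.List.mem_pyRange_neg_one, decide_eq_true_iff]
    rw [hkeys]
    constructor
    · rintro ⟨_, h⟩; exact h
    · intro h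
      have := tc_ne_nil_bounds w bs m w.length a h
      exact ⟨⟨by omega, by omega⟩, h⟩
  have hpair : List.Pairwise (fun a b => (id b : Int) < id a) ys := by
    have hbase : List.Pairwise (fun (a b : Int) => (id b : Int) < id a) (PySem.List.pyRange m 0 (-1)) := by
      rw [PySem.List.pyRange_neg_one_eq_reverse, List.pairwise_reverse]
      exact PySem.List.pairwise_lt_pyRange_one _ _
    exact List.Pairwise.sublist (List.filter_sublist) hbase
  rw [PySem.List.sorted_rev_eq_of_perm_of_pairwise_gt _ _ _ hperm hpair,
    PySem.List.foldl_append_eq_flatMap, List.nil_append]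
  have hfun : (fun n => D.getD n []) = tc w bs m w.length := funext hg
  rw [hfun, ← flatMap_filter_ne_nil]

-- ===== VERDICT (by name: the statement is the Claim_ definition above) =====
theorem find_brand_phrases_spec : Claim_equal_find_brand_phrases := by
  intro words brand_set max_len _
  unfold Spec_find_brand_phrases
  rw [A_char, B_char]
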